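-- pv_equiv track=rewrite | github.com/krysdam/advent-of-code-2024 | 12/solution.py | region_corner_count
-- ===== SOURCE A (Python) =====
-- def region_corner_count(region):
--     """The number of corners in the region."""
--     # Draw a rectangle around the region.
--     # Iterate over all the cells in that rectangle.
--     # Count how many of those have a corner of the region
--     # at their bottom right corner.
--     corner_count = 0
--     min_r = min(r for r, c in region)
--     max_r = max(r for r, c in region)
--     min_c = min(c for r, c in region)
--     max_c = max(c for r, c in region)
--     for r in range(min_r-1, max_r+1):
--         for c in range(min_c-1, max_c+1):
--             # Is there a corner at my bottom right?
--             # This depends on which adjacent cells are in the region.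
--             # Specifically: (r, c), (r+1, c), (r, c+1), (r+1, c+1).
--             top_left = (r, c) in region
--             top_right = (r, c+1) in region
--             bottom_left = (r+1, c) in region
--             bottom_right = (r+1, c+1) in region
--             # How many of these are in the region?
--             in_count = top_left + top_right + bottom_left + bottom_right
--             # If exactly one or three are in the region, there's a corner.
--             if in_count in [1, 3]:
--                 corner_count += 1
--             # If exactly four or none are in the region, there's no corner.
--             elif in_count in [0, 4]:
--                 pass
--             # If two diagonal cells are in the region, this is two corners.
--             # (See the case about two interior regions making two corners).
--             elif top_left and bottom_right or top_right and bottom_left: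
--                 corner_count += 2
--             # The other case is two adjacent, which is no corners.
--     return corner_count
-- ===== SOURCE B (Python) =====
-- def region_corner_count(region):
--     """The number of corners in the region."""
--     # Instead of scanning the whole bounding rectangle, visit only the
--     # corner positions adjacent to some region cell (deduped via a set).
--     cells = set(region)
--     corners = set()
--     for (r, c) in cells:
--         corners.update([(r - 1, c - 1), (r - 1, c), (r, c - 1), (r, c)])
--     total = 0
--     for (r, c) in corners:
--         tl = (r, c) in cells
--         tr = (r, c + 1) in cells
--         bl = (r + 1, c) in cells
--         br = (r + 1, c + 1) in cells
--         n = tl + tr + bl + br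
--         if n in (1, 3):
--             total += 1
--         elif n == 2 and ((tl and br) or (tr and bl)):
--             total += 2
--     return total
-- ===== Notes on version B (the rewrite author's own statement) =====
-- stated objective: faster
-- what changed: Instead of scanning every cell of the bounding rectangle and testing list membership, B builds a hash set of the cells and visits only the deduplicated corner positions adjacent to some region cell, summing the same corner rule there.
import Mathlib
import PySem

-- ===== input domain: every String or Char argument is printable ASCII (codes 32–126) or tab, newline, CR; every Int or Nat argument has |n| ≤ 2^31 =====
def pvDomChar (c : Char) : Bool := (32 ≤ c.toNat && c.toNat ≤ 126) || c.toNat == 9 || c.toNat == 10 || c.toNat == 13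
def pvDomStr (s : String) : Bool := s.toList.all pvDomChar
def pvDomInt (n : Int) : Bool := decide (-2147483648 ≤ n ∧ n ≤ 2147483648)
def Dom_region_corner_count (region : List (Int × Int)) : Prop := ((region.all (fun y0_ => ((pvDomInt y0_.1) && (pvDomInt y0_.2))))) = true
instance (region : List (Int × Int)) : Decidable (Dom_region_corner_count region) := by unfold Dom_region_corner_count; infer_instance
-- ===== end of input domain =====

-- B replaces A's bounding-rectangle scan with list membership by a single pass over
-- the deduplicated corner positions adjacent to region cells, with set membership (faster).

-- ===== PORT A =====
def region_corner_count (region : List (Int × Int)) : Int :=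
  -- min/max of a generator: ValueError on empty region (the `none` branch), excluded by Pre_
  match PySem.List.min? (region.map (fun rc => rc.1)) (fun x => x),
        PySem.List.max? (region.map (fun rc => rc.1)) (fun x => x),
        PySem.List.min? (region.map (fun rc => rc.2)) (fun x => x),
        PySem.List.max? (region.map (fun rc => rc.2)) (fun x => x) with
  | some min_r, some max_r, some min_c, some max_c =>
      (PySem.List.pyRange (min_r - 1) (max_r + 1) 1).foldl (fun corner_count r =>
        (PySem.List.pyRange (min_c - 1) (max_c + 1) 1).foldl (fun corner_count c =>
          let top_left := decide ((r, c) ∈ region)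
          let top_right := decide ((r, c + 1) ∈ region)
          let bottom_left := decide ((r + 1, c) ∈ region)
          let bottom_right := decide ((r + 1, c + 1) ∈ region)
          let in_count : Int := (if top_left then 1 else 0) + (if top_right then 1 else 0)
            + (if bottom_left then 1 else 0) + (if bottom_right then 1 else 0)
          if in_count = 1 ∨ in_count = 3 then corner_count + 1
          else if in_count = 0 ∨ in_count = 4 then corner_count
          else if (top_left && bottom_right) || (top_right && bottom_left) then corner_count + 2
          else corner_count) corner_count) 0
  | _, _, _, _ => 0

-- ===== PORT B =====
-- corners.update([(r-1,c-1),(r-1,c),(r,c-1),(r,c)])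
def cornerNeighbors (p : Int × Int) : List (Int × Int) :=
  [(p.1 - 1, p.2 - 1), (p.1 - 1, p.2), (p.1, p.2 - 1), (p.1, p.2)]

-- the body of B's loop over the corner set (the corner rule at one corner position)
def cornerContrib (cells : PySem.Set (Int × Int)) (p : Int × Int) : Int :=
  let tl := PySem.Set.contains cells (p.1, p.2)
  let tr := PySem.Set.contains cells (p.1, p.2 + 1)
  let bl := PySem.Set.contains cells (p.1 + 1, p.2)
  let br := PySem.Set.contains cells (p.1 + 1, p.2 + 1)
  let n : Int := (if tl then 1 else 0) + (if tr then 1 else 0)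
    + (if bl then 1 else 0) + (if br then 1 else 0)
  if n = 1 ∨ n = 3 then 1
  else if n = 2 ∧ ((tl && br) || (tr && bl)) = true then 2
  else 0

def region_corner_count_alt (region : List (Int × Int)) : Int :=
  let cells : PySem.Set (Int × Int) := PySem.Set.ofList region
  let corners : PySem.Set (Int × Int) :=
    cells.foldl (fun s p => PySem.Set.update s (cornerNeighbors p)) PySem.Set.empty
  -- summing over the set: the total does not depend on Python's set-iteration order
  corners.foldl (fun total p => total + cornerContrib cells p) 0

-- ===== PRECONDITION & SPEC =====
-- Pre_ excludes only the empty region, on which A raises ValueError (min() of an empty sequence).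
def Pre_region_corner_count (region : List (Int × Int)) : Prop := region ≠ []
instance (region : List (Int × Int)) : Decidable (Pre_region_corner_count region) := by unfold Pre_region_corner_count; infer_instance
def pvWitness_region_corner_count : (List (Int × Int)) := [((0 : Int), (0 : Int))]

def Spec_region_corner_count (region : List (Int × Int)) (out : Int) : Prop := out = region_corner_count_alt region
instance (region : List (Int × Int)) (out : Int) : Decidable (Spec_region_corner_count region out) := by unfold Spec_region_corner_count; infer_instance

-- ===== CLAIM (what is proved, stated in full; the proofs are below) =====
def Claim_equal_region_corner_count : Prop := ∀ (region : List (Int × Int)), Dom_region_corner_count region → Pre_region_corner_count region → Spec_region_corner_count region (region_corner_count region)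

-- ===== LEMMAS AND PROOFS =====

theorem contains_ofList_eq_decide (l : List (Int × Int)) (x : Int × Int) :
    PySem.Set.contains (PySem.Set.ofList l) x = decide (x ∈ l) := by
  by_cases h : x ∈ l <;> simp [h]

-- the common per-corner contribution, written through B's helper
-- A's inner loop body adds exactly this contribution
theorem A_body_eq (region : List (Int × Int)) (r c acc : Int) :
    (let top_left := decide ((r, c) ∈ region)
     let top_right := decide ((r, c + 1) ∈ region)
     let bottom_left := decide ((r + 1, c) ∈ region)
     let bottom_right := decide ((r + 1, c + 1) ∈ region)
     let in_count : Int := (if top_left then 1 else 0) + (if top_right then 1 else 0)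
       + (if bottom_left then 1 else 0) + (if bottom_right then 1 else 0)
     if in_count = 1 ∨ in_count = 3 then acc + 1
     else if in_count = 0 ∨ in_count = 4 then acc
     else if (top_left && bottom_right) || (top_right && bottom_left) then acc + 2
     else acc) = acc + cornerContrib (PySem.Set.ofList region) (r, c) := by
  simp only [cornerContrib, contains_ofList_eq_decide]
  by_cases h1 : (r, c) ∈ region <;> by_cases h2 : (r, c + 1) ∈ region <;>
    by_cases h3 : (r + 1, c) ∈ region <;> by_cases h4 : (r + 1, c + 1) ∈ region <;>
    simp [h1, h2, h3, h4]

-- drop zero contributions from a sum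
theorem sum_map_filter_ne_zero (l : List (Int × Int)) (f : (Int × Int) → Int) :
    ((l.filter (fun x => f x ≠ 0)).map f).sum = (l.map f).sum := by
  induction l with
  | nil => rfl
  | cons a t ih =>
    by_cases h : f a = 0
    · simpa [List.filter_cons, h] using ih
    · simp only [List.filter_cons]
      simp only [ne_eq, h, not_false_eq_true, decide_true, List.map_cons, List.sum_cons]
      simpa using ih

-- membership in B's corner set
theorem mem_foldl_update (l : List (Int × Int)) (s : PySem.Set (Int × Int)) (x : Int × Int) :
    (x ∈ l.foldl (fun s p => PySem.Set.update s (cornerNeighbors p)) s) ↔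
      x ∈ s ∨ ∃ p ∈ l, x ∈ cornerNeighbors p := by
  induction l generalizing s with
  | nil => simp
  | cons a t ih =>
    simp only [List.foldl_cons, ih, PySem.Set.mem_update, List.mem_cons]
    constructor
    · rintro (⟨h | h⟩ | ⟨p, hp, hx⟩)
      · exact Or.inl h
      · exact Or.inr ⟨a, Or.inl rfl, h⟩
      · exact Or.inr ⟨p, Or.inr hp, hx⟩
    · rintro (h | ⟨p, hp | hp, hx⟩)
      · exact Or.inl (Or.inl h)
      · exact Or.inl (Or.inr (hp ▸ hx))
      · exact Or.inr ⟨p, hp, hx⟩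

theorem nodup_foldl_update (l : List (Int × Int)) (s : PySem.Set (Int × Int)) (hs : s.Nodup) :
    (l.foldl (fun s p => PySem.Set.update s (cornerNeighbors p)) s).Nodup := by
  induction l generalizing s with
  | nil => exact hs
  | cons a t ih => exact ih _ (PySem.Set.nodup_update _ _ hs)

theorem sum_map_flatMap (l : List Int) (g : Int → List (Int × Int)) (f : (Int × Int) → Int) :
    ((l.flatMap g).map f).sum = (l.map (fun r => ((g r).map f).sum)).sum := by
  induction l with
  | nil => rfl
  | cons a t ih => simp [List.flatMap_cons, ih]

-- a nonzero contribution needs an adjacent region cell, so the corner is in B's corner set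
theorem mem_corners_of_ne_zero (region : List (Int × Int)) (x : Int × Int)
    (hne : cornerContrib (PySem.Set.ofList region) x ≠ 0) :
    x ∈ (PySem.Set.ofList region).foldl (fun s p => PySem.Set.update s (cornerNeighbors p)) PySem.Set.empty := by
  rw [mem_foldl_update]
  right
  by_cases h1 : PySem.Set.contains (PySem.Set.ofList region) (x.1, x.2) = true
  · exact ⟨(x.1, x.2), (PySem.Set.contains_iff _ _).mp h1, by simp [cornerNeighbors]⟩
  · by_cases h2 : PySem.Set.contains (PySem.Set.ofList region) (x.1, x.2 + 1) = true
    · exact ⟨(x.1, x.2 + 1), (PySem.Set.contains_iff _ _).mp h2, by simp [cornerNeighbors]⟩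
    · by_cases h3 : PySem.Set.contains (PySem.Set.ofList region) (x.1 + 1, x.2) = true
      · exact ⟨(x.1 + 1, x.2), (PySem.Set.contains_iff _ _).mp h3, by simp [cornerNeighbors]⟩
      · by_cases h4 : PySem.Set.contains (PySem.Set.ofList region) (x.1 + 1, x.2 + 1) = true
        · exact ⟨(x.1 + 1, x.2 + 1), (PySem.Set.contains_iff _ _).mp h4, by simp [cornerNeighbors]⟩
        · have hn1 : ¬ (x.1, x.2) ∈ region := by simpa [contains_ofList_eq_decide] using h1
          have hn2 : ¬ (x.1, x.2 + 1) ∈ region := by simpa [contains_ofList_eq_decide] using h2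
          have hn3 : ¬ (x.1 + 1, x.2) ∈ region := by simpa [contains_ofList_eq_decide] using h3
          have hn4 : ¬ (x.1 + 1, x.2 + 1) ∈ region := by simpa [contains_ofList_eq_decide] using h4
          exact absurd (by simp [cornerContrib, hn1, hn2, hn3, hn4] :
              cornerContrib (PySem.Set.ofList region) x = 0) hne

theorem region_corner_count_spec : Claim_equal_region_corner_count := by
  intro region _ hpre
  unfold Spec_region_corner_count
  -- the four extrema exist on a nonempty region
  have hmap1 : region.map (fun rc => rc.1) ≠ [] := by
    intro h; exact hpre (List.map_eq_nil_iff.mp h)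
  have hmap2 : region.map (fun rc => rc.2) ≠ [] := by
    intro h; exact hpre (List.map_eq_nil_iff.mp h)
  obtain ⟨mr, hmr⟩ : ∃ v, PySem.List.min? (region.map (fun rc => rc.1)) (fun x => x) = some v := by
    cases h : PySem.List.min? (region.map (fun rc => rc.1)) (fun x => x) with
    | none => exact absurd ((PySem.List.min?_eq_none_iff _ _).mp h) hmap1
    | some v => exact ⟨v, rfl⟩
  obtain ⟨Mr, hMr⟩ : ∃ v, PySem.List.max? (region.map (fun rc => rc.1)) (fun x => x) = some v := by
    cases h : PySem.List.max? (region.map (fun rc => rc.1)) (fun x => x) with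
    | none => exact absurd ((PySem.List.max?_eq_none_iff _ _).mp h) hmap1
    | some v => exact ⟨v, rfl⟩
  obtain ⟨mc, hmc⟩ : ∃ v, PySem.List.min? (region.map (fun rc => rc.2)) (fun x => x) = some v := by
    cases h : PySem.List.min? (region.map (fun rc => rc.2)) (fun x => x) with
    | none => exact absurd ((PySem.List.min?_eq_none_iff _ _).mp h) hmap2
    | some v => exact ⟨v, rfl⟩
  obtain ⟨Mc, hMc⟩ : ∃ v, PySem.List.max? (region.map (fun rc => rc.2)) (fun x => x) = some v := by
    cases h : PySem.List.max? (region.map (fun rc => rc.2)) (fun x => x) with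
    | none => exact absurd ((PySem.List.max?_eq_none_iff _ _).mp h) hmap2
    | some v => exact ⟨v, rfl⟩
  -- names
  set cells : PySem.Set (Int × Int) := PySem.Set.ofList region with hcells
  set f : (Int × Int) → Int := cornerContrib cells with hf
  set corners : PySem.Set (Int × Int) :=
    cells.foldl (fun s p => PySem.Set.update s (cornerNeighbors p)) PySem.Set.empty with hcorners
  set rrange : List Int := PySem.List.pyRange (mr - 1) (Mr + 1) 1 with hrrange
  set crange : List Int := PySem.List.pyRange (mc - 1) (Mc + 1) 1 with hcrange
  set grid : List (Int × Int) := rrange.flatMap (fun r => crange.map (fun c => (r, c))) with hgrid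
  -- A = sum of f over the rectangle grid
  have hA : region_corner_count region = (grid.map f).sum := by
    simp only [region_corner_count, hmr, hMr, hmc, hMc]
    have houter : (fun (corner_count r : Int) =>
        crange.foldl (fun corner_count c =>
          let top_left := decide ((r, c) ∈ region)
          let top_right := decide ((r, c + 1) ∈ region)
          let bottom_left := decide ((r + 1, c) ∈ region)
          let bottom_right := decide ((r + 1, c + 1) ∈ region)
          let in_count : Int := (if top_left then 1 else 0) + (if top_right then 1 else 0)
            + (if bottom_left then 1 else 0) + (if bottom_right then 1 else 0)
          if in_count = 1 ∨ in_count = 3 then corner_count + 1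
          else if in_count = 0 ∨ in_count = 4 then corner_count
          else if (top_left && bottom_right) || (top_right && bottom_left) then corner_count + 2
          else corner_count) corner_count)
        = (fun corner_count r => corner_count + (crange.map (fun c => f (r, c))).sum) := by
      funext acc r
      have hstep : (fun (corner_count c : Int) =>
          let top_left := decide ((r, c) ∈ region)
          let top_right := decide ((r, c + 1) ∈ region)
          let bottom_left := decide ((r + 1, c) ∈ region)
          let bottom_right := decide ((r + 1, c + 1) ∈ region)
          let in_count : Int := (if top_left then 1 else 0) + (if top_right then 1 else 0)
            + (if bottom_left then 1 else 0) + (if bottom_right then 1 else 0)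
          if in_count = 1 ∨ in_count = 3 then corner_count + 1
          else if in_count = 0 ∨ in_count = 4 then corner_count
          else if (top_left && bottom_right) || (top_right && bottom_left) then corner_count + 2
          else corner_count)
          = (fun corner_count c => corner_count + f (r, c)) := by
        funext acc c
        exact A_body_eq region r c acc
      rw [hstep, PySem.List.foldl_add]
    rw [houter, PySem.List.foldl_add]
    rw [hgrid, sum_map_flatMap, ← hrrange]
    simp [List.map_map, Function.comp_def]
  -- B = sum of f over the corner set
  have hB : region_corner_count_alt region = (corners.map f).sum := by
    rw [region_corner_count_alt]
    rw [PySem.List.foldl_add]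
    simp [← hcells, ← hf]
    rw [show (List.foldl (fun s p => PySem.Set.update s (cornerNeighbors p)) ([] : PySem.Set (Int × Int)) cells) = corners from hcorners.symm]
  -- bounds: every region cell lies between the extrema
  have hbound : ∀ p ∈ region, mr ≤ p.1 ∧ p.1 ≤ Mr ∧ mc ≤ p.2 ∧ p.2 ≤ Mc := by
    intro p hp
    refine ⟨PySem.List.min?_isMin hmr p.1 (List.mem_map_of_mem hp),
            PySem.List.max?_isMax hMr p.1 (List.mem_map_of_mem hp),
            PySem.List.min?_isMin hmc p.2 (List.mem_map_of_mem hp),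
            PySem.List.max?_isMax hMc p.2 (List.mem_map_of_mem hp)⟩
  -- B's corner set sits inside the rectangle grid
  have hsub : ∀ x ∈ corners, x ∈ grid := by
    intro x hx
    rw [hcorners, mem_foldl_update] at hx
    rcases hx with h | ⟨p, hp, hx⟩
    · exact absurd h (by simp [PySem.Set.empty])
    · have hpr := hbound p ((PySem.Set.mem_ofList _ _).mp hp)
      have hxb : (x.1 = p.1 - 1 ∨ x.1 = p.1) ∧ (x.2 = p.2 - 1 ∨ x.2 = p.2) := by
        simp only [cornerNeighbors, List.mem_cons] at hx
        rcases hx with h | h | h | h <;>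
          simp [Prod.ext_iff] at h <;> omega
      rw [hgrid, List.mem_flatMap]
      refine ⟨x.1, ?_, ?_⟩
      · rw [hrrange, PySem.List.mem_pyRange_one]; omega
      · rw [List.mem_map]
        exact ⟨x.2, by rw [hcrange, PySem.List.mem_pyRange_one]; omega, rfl⟩
  -- nodup on both sides
  have hnodup_corners : corners.Nodup :=
    nodup_foldl_update _ _ (by simp [PySem.Set.empty])
  have hnodup_grid : grid.Nodup := by
    rw [hgrid, List.nodup_flatMap]
    constructor
    · intro r _
      exact (PySem.List.nodup_pyRange_one _ _).map (fun a b h => by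
        simpa using congrArg Prod.snd h)
    · have := PySem.List.pairwise_lt_pyRange_one (mr - 1) (Mr + 1)
      rw [← hrrange] at this
      refine this.imp ?_
      intro a b hab x hx1 hx2
      simp only [List.mem_map] at hx1 hx2
      obtain ⟨c1, _, rfl⟩ := hx1
      obtain ⟨c2, _, h⟩ := hx2
      have := congrArg Prod.fst h
      simp at this
      omega
  -- same nonzero support, hence equal sums
  have hperm : (grid.filter (fun x => f x ≠ 0)).Perm (corners.filter (fun x => f x ≠ 0)) := by
    rw [List.perm_ext_iff_of_nodup (hnodup_grid.filter _) (hnodup_corners.filter _)]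
    intro x
    simp only [List.mem_filter, decide_eq_true_eq]
    constructor
    · rintro ⟨_, hne⟩
      exact ⟨mem_corners_of_ne_zero region x hne, hne⟩
    · rintro ⟨hm, hne⟩
      exact ⟨hsub x hm, hne⟩
  calc region_corner_count region = (grid.map f).sum := hA
    _ = ((grid.filter (fun x => f x ≠ 0)).map f).sum := (sum_map_filter_ne_zero _ _).symm
    _ = ((corners.filter (fun x => f x ≠ 0)).map f).sum := by rw [hperm.map f |>.sum_eq]
    _ = (corners.map f).sum := sum_map_filter_ne_zero _ _
    _ = region_corner_count_alt region := hB.symm
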